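-- pv_equiv track=rewrite | github.com/k-harada/AtCoder | ABC/ABC151-200/ABC184/B.py | solve
-- ===== SOURCE A (Python) =====
-- def solve(n, x, s):
--     res = x
--     for t in s:
--         if t == 'o':
--             res += 1
--         else:
--             res -= 1
--             res = max(res, 0)
--     return res
-- ===== SOURCE B (Python) =====
-- def solve(n, x, s):
--     P = 0
--     minp = None
--     for t in s:
--         if t == 'o':
--             P += 1
--         else:
--             P -= 1
--             minp = P if minp is None else min(minp, P)
--     if minp is None:
--         return x + P
--     return max(x + P, P - minp)
-- ===== Notes on version B (the rewrite author's own statement) =====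
-- stated objective: alternative
-- what changed: Replaces the step-by-step clamped score simulation with one pass collecting aggregate prefix statistics (running total P and the minimum of P at clamp positions) and a closed-form max at the end.
import Mathlib
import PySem

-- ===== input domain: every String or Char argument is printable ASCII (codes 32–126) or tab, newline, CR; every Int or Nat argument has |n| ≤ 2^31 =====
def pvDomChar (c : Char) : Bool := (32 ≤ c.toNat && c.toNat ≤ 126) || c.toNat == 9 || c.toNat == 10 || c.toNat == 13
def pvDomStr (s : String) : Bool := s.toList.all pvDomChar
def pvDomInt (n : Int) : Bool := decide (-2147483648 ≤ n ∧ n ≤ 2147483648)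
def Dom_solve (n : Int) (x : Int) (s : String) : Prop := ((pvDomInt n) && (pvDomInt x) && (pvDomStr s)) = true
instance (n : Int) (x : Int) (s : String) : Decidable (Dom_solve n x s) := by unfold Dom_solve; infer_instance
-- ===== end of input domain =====

-- B replaces A's clamped step-by-step simulation by aggregate prefix statistics and a closed-form max (alternative decomposition, same O(n) cost).

-- ===== PORT A =====
-- A: res = x; for each char, +1 on 'o', else -1 then clamp at 0.
def solve (n : Int) (x : Int) (s : String) : Int :=
  s.toList.foldl (fun res t => if t = 'o' then res + 1 else max (res - 1) 0) x

-- ===== PORT B =====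
-- B: one pass over s keeping (P, minp): running total P and the minimum of P right after each non-'o' step.
def solveAltStep (st : Int × Option Int) (t : Char) : Int × Option Int :=
  if t = 'o' then (st.1 + 1, st.2)
  else
    let P := st.1 - 1
    (P, some (match st.2 with | none => P | some v => min v P))

def solve_alt (n : Int) (x : Int) (s : String) : Int :=
  match s.toList.foldl solveAltStep (0, none) with
  | (P, none) => x + P
  | (P, some m) => max (x + P) (P - m)

-- ===== PRECONDITION & SPEC =====
def Spec_solve (n : Int) (x : Int) (s : String) (out : Int) : Prop := out = solve_alt n x s
instance (n : Int) (x : Int) (s : String) (out : Int) : Decidable (Spec_solve n x s out) := by unfold Spec_solve; infer_instance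

-- ===== CLAIM (what is proved, stated in full; the proofs are below) =====
def Claim_equal_solve : Prop := ∀ (n : Int) (x : Int) (s : String), Dom_solve n x s → Spec_solve n x s (solve n x s)

-- ===== LEMMAS AND PROOFS =====

def solveInterp (x : Int) (st : Int × Option Int) : Int :=
  match st with
  | (P, none) => x + P
  | (P, some m) => max (x + P) (P - m)

theorem solve_fold_eq (l : List Char) : ∀ (x : Int) (st : Int × Option Int),
    l.foldl (fun res t => if t = 'o' then res + 1 else max (res - 1) 0) (solveInterp x st)
      = solveInterp x (l.foldl solveAltStep st) := by
  induction l with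
  | nil => intro x st; rfl
  | cons t ls ih =>
    intro x st
    obtain ⟨P, m⟩ := st
    simp only [List.foldl]
    rw [← ih]
    congr 1
    by_cases h : t = 'o' <;> cases m <;>
      simp [solveAltStep, solveInterp, h] <;> omega

-- ===== VERDICT (by name: the statement is the Claim_ definition above) =====
theorem solve_spec : Claim_equal_solve := by
  intro n x s _
  show solve n x s = solve_alt n x s
  unfold solve solve_alt
  have h := solve_fold_eq s.toList x (0, none)
  simpa [solveInterp] using h
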